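-- pv_equiv track=rewrite | github.com/utlond/arithmetic-calculator | calcLexer.py | parSpacesIdx
-- ===== SOURCE A (Python) =====
-- def parSpacesIdx(userStrInput):
--     stripped_str = userStrInput.strip()
--     parOpenIdx = []; parCloseIdx = []; spacesIdx = []
--
--     for i in range(len(stripped_str)):
--         if stripped_str[i] == "(":
--             parOpenIdx = parOpenIdx + [i]
--         elif stripped_str[i] == ")":
--             parCloseIdx = parCloseIdx + [i]
--         elif stripped_str[i] == " ":
--             spacesIdx = spacesIdx + [i]
--
--     return parOpenIdx, parCloseIdx, spacesIdx, stripped_str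
-- ===== SOURCE B (Python) =====
-- def parSpacesIdx(userStrInput):
--     stripped_str = userStrInput.strip()
--
--     def scan(ch):
--         out = []
--         i = stripped_str.find(ch)
--         while i != -1:
--             out.append(i)
--             i = stripped_str.find(ch, i + 1)
--         return out
--
--     return scan("("), scan(")"), scan(" "), stripped_str
-- ===== Notes on version B (the rewrite author's own statement) =====
-- stated objective: faster
-- what changed: Replaces A's per-character index loop classifying each position into three accumulators (grown by quadratic 'list + [i]' concatenation) with three independent restartable str.find scans: for each target character, repeatedly ask the C-level string-search primitive for the next occurrence after the previous hit and append it.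
import Mathlib
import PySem

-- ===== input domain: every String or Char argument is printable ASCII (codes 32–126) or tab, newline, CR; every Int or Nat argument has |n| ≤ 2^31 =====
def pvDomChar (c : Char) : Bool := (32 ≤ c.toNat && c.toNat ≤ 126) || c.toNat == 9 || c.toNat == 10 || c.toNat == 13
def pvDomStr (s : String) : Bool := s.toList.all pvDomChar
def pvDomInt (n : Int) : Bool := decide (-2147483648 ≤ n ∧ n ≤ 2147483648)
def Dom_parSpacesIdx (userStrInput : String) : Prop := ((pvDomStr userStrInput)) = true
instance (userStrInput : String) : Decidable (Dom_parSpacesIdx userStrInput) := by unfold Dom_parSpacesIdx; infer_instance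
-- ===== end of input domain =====

-- B replaces A's per-character classifying index loop by three independent restartable
-- str.find scans, one per target character, avoiding A's quadratic list concatenation (measured faster).

-- ===== PORT A =====
-- literal port of A: index loop over range(len(stripped)), one if/elif/elif chain,
-- each list grown by 'acc + [i]'
def parSpacesIdx (userStrInput : String) : List Int × List Int × List Int × String :=
  let stripped := PySem.Str.strip userStrInput
  let r := (PySem.List.pyRange 0 (PySem.Str.len stripped) 1).foldl
    (fun (acc : List Int × List Int × List Int) i =>
      let c := PySem.List.pyGetD stripped.toList i ' '    -- stripped[i]; i is in range
      if c = '(' then (acc.1 ++ [i], acc.2.1, acc.2.2)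
      else if c = ')' then (acc.1, acc.2.1 ++ [i], acc.2.2)
      else if c = ' ' then (acc.1, acc.2.1, acc.2.2 ++ [i])
      else acc) ([], [], [])
  (r.1, r.2.1, r.2.2, stripped)

-- ===== PORT B =====
-- Source B's while loop 'i = stripped.find(ch); while i != -1: out.append(i); i = stripped.find(ch, i+1)'
-- as fuel recursion (fuel = len+1 bounds the number of hits; findFrom _ _ 0 = find)
def pvScan (l : List Char) (sub : List Char) (k : Nat) (fuel : Nat) : List Int :=
  match fuel with
  | 0 => []
  | fuel + 1 =>
    let r := PySem.Chars.findFrom l sub (k : Int)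
    if r = -1 then [] else r :: pvScan l sub (r.toNat + 1) fuel

def parSpacesIdx_alt (userStrInput : String) : List Int × List Int × List Int × String :=
  let stripped := PySem.Str.strip userStrInput
  let l := stripped.toList
  (pvScan l ['('] 0 (l.length + 1),
   pvScan l [')'] 0 (l.length + 1),
   pvScan l [' '] 0 (l.length + 1),
   stripped)

-- ===== PRECONDITION & SPEC =====
def Spec_parSpacesIdx (userStrInput : String) (out : List Int × List Int × List Int × String) : Prop := out = parSpacesIdx_alt userStrInput
instance (userStrInput : String) (out : List Int × List Int × List Int × String) : Decidable (Spec_parSpacesIdx userStrInput out) := by unfold Spec_parSpacesIdx; infer_instance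

-- ===== CLAIM (what is proved, stated in full; the proofs are below) =====
def Claim_equal_parSpacesIdx : Prop := ∀ (userStrInput : String), Dom_parSpacesIdx userStrInput → Spec_parSpacesIdx userStrInput (parSpacesIdx userStrInput)

-- ===== LEMMAS AND PROOFS =====

-- A's classifying fold over enumerate l s, started at (a, b, c), appends exactly the three
-- filtered index lists of enumerate l s to the three accumulators.
theorem pv_fold_enum (l : List Char) (s : Int) (a b c : List Int) :
    (PySem.List.enumerate l s).foldl
      (fun (acc : List Int × List Int × List Int) (p : Int × Char) =>
        if p.2 = '(' then (acc.1 ++ [p.1], acc.2.1, acc.2.2)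
        else if p.2 = ')' then (acc.1, acc.2.1 ++ [p.1], acc.2.2)
        else if p.2 = ' ' then (acc.1, acc.2.1, acc.2.2 ++ [p.1])
        else acc) (a, b, c)
    = (a ++ ((PySem.List.enumerate l s).filter (fun p => p.2 == '(')).map (·.1),
       b ++ ((PySem.List.enumerate l s).filter (fun p => p.2 == ')')).map (·.1),
       c ++ ((PySem.List.enumerate l s).filter (fun p => p.2 == ' ')).map (·.1)) := by
  induction l generalizing s a b c with
  | nil => simp [PySem.List.enumerate_nil]
  | cons x xs ih =>
    rw [PySem.List.enumerate_cons]
    simp only [List.foldl_cons, List.filter_cons]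
    by_cases h1 : x = '('
    · simp [h1, ih]
    · by_cases h2 : x = ')'
      · simp [h1, h2, ih]
      · by_cases h3 : x = ' '
        · simp [h1, h2, h3, ih]
        · simp [h1, h2, h3, ih]

-- the filtered-enumerate index list, restated over List.range
theorem pv_enum_filter_range (l : List Char) (c : Char) (s : Int) :
    ((PySem.List.enumerate l s).filter (fun p => p.2 == c)).map (·.1)
      = ((List.range l.length).filter (fun i => decide (l[i]? = some c))).map (fun (i : Nat) => s + (i : Int)) := by
  induction l generalizing s with
  | nil => simp [PySem.List.enumerate_nil]
  | cons x xs ih =>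
    rw [PySem.List.enumerate_cons, List.length_cons, List.range_succ_eq_map,
        List.filter_cons, List.filter_cons]
    have hq' : (((List.range xs.length).map Nat.succ).filter
          (fun i => decide ((x :: xs)[i]? = some c)))
        = ((List.range xs.length).filter (fun i => decide (xs[i]? = some c))).map Nat.succ := by
      rw [List.filter_map]
      congr 1
    rw [hq']
    have htail : List.map (fun (i : Nat) => s + (i : Int))
          (List.map Nat.succ ((List.range xs.length).filter (fun i => decide (xs[i]? = some c))))
        = ((List.range xs.length).filter (fun i => decide (xs[i]? = some c))).map
            (fun (i : Nat) => (s + 1) + (i : Int)) := by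
      rw [List.map_map]
      apply List.map_congr_left
      intro i _
      simp [Function.comp, Nat.succ_eq_add_one]
      ring
    by_cases hx : x = c
    · have h1 : ((s, x).2 == c) = true := by simp [hx]
      have h2 : (decide ((x :: xs)[0]? = some c)) = true := by simp [hx]
      rw [h1, h2, if_pos rfl, if_pos rfl, List.map_cons, List.map_cons, htail, ih (s + 1)]
      norm_num
    · have h1 : ((s, x).2 == c) = false := by simp [hx]
      have h2 : (decide ((x :: xs)[0]? = some c)) = false := by simp [hx]
      rw [h1, h2]
      simp only [Bool.false_eq_true, if_false]
      rw [htail, ih (s + 1)]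

-- dropping the least hit from a range filter with a lower bound
theorem pv_filter_range_step (n m k : Nat) (P : Nat → Bool) (hk : k ≤ m) (hm : m < n)
    (hP : P m = true) (hmin : ∀ i, k ≤ i → i < m → P i = false) :
    (List.range n).filter (fun i => decide (k ≤ i) && P i)
      = m :: (List.range n).filter (fun i => decide (m + 1 ≤ i) && P i) := by
  induction n with
  | zero => omega
  | succ n ih =>
    rw [List.range_succ]
    simp only [List.filter_append]
    rcases Nat.lt_or_ge m n with h | h
    · rw [ih h]
      rw [List.filter_singleton, List.filter_singleton]
      have h1 : (decide (k ≤ n) && P n) = (decide (m + 1 ≤ n) && P n) := by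
        have : decide (k ≤ n) = true := by simp; omega
        have : decide (m + 1 ≤ n) = true := by simp; omega
        simp_all
      rw [h1]
      simp [List.cons_append]
    · have hmn : m = n := by omega
      subst hmn
      have h0 : (List.range m).filter (fun i => decide (k ≤ i) && P i) = [] := by
        apply List.filter_eq_nil_iff.2
        intro i hi
        have : i < m := List.mem_range.1 hi
        by_cases hki : k ≤ i
        · simp [hmin i hki this]
        · simp [hki]
      have h2 : (List.range m).filter (fun i => decide (m + 1 ≤ i) && P i) = [] := by
        apply List.filter_eq_nil_iff.2
        intro i hi
        have : i < m := List.mem_range.1 hi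
        have : ¬ (m + 1 ≤ i) := by omega
        simp [this]
      rw [h0, h2, List.filter_singleton, List.filter_singleton]
      have : (decide (k ≤ m) && P m) = true := by simp [hP]; omega
      rw [this]
      have : ¬ (m + 1 ≤ m) := by omega
      simp [this]

-- a singleton is an infix iff its element occurs
theorem pv_singleton_infix {c : Char} {xs : List Char} (h : c ∈ xs) : [c] <:+: xs := by
  rcases List.append_of_mem h with ⟨s, t, rfl⟩
  exact ⟨s, t, by simp⟩

-- the restartable find scan produces exactly the occurrence indices ≥ k, in order
theorem pv_scan_spec (l : List Char) (c : Char) (k fuel : Nat)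
    (hk : k ≤ l.length) (hfuel : l.length + 1 - k ≤ fuel) :
    pvScan l [c] k fuel
      = ((List.range l.length).filter (fun i => decide (k ≤ i) && decide (l[i]? = some c))).map
          (fun (i : Nat) => (i : Int)) := by
  induction fuel generalizing k with
  | zero => omega
  | succ fuel ih =>
    rw [pvScan]
    by_cases hneg : PySem.Chars.findFrom l [c] (k : Int) = -1
    · rw [if_pos hneg]
      have hno : ¬ [c] <:+: l.drop k :=
        (PySem.Chars.findFrom_natCast_eq_neg_one_iff l [c] k hk).1 hneg
      symm
      rw [List.map_eq_nil_iff]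
      apply List.filter_eq_nil_iff.2
      intro i hi
      have hin : i < l.length := List.mem_range.1 hi
      by_cases hki : k ≤ i
      · have : ¬ (l[i]? = some c) := by
          intro hc
          apply hno
          apply pv_singleton_infix
          have : (l.drop k)[i - k]? = some c := by
            rw [List.getElem?_drop]
            rwa [show k + (i - k) = i by omega]
          exact List.mem_of_getElem? this
        simp [this]
      · simp [hki]
    · rw [if_neg hneg]
      obtain ⟨hge, hpre, hmin⟩ := PySem.Chars.findFrom_natCast_spec l [c] k hk hneg
      set r := PySem.Chars.findFrom l [c] (k : Int) with hr
      have hr0 : (0 : Int) ≤ r := le_trans (by exact_mod_cast Nat.zero_le k) hge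
      set m := r.toNat with hmdef
      have hrm : r = (m : Int) := (Int.toNat_of_nonneg hr0).symm
      have hkm : k ≤ m := by omega
      obtain ⟨t, ht⟩ := hpre
      have hdrop : l.drop m = c :: t := by simpa using ht.symm
      have hmlt : m < l.length := by
        by_contra hge'
        have : l.drop m = [] := List.drop_eq_nil_of_le (by omega)
        rw [this] at hdrop; cases hdrop
      have hPm : l[m]? = some c := by
        have : (l.drop m)[0]? = some c := by rw [hdrop]; rfl
        rw [List.getElem?_drop] at this
        simpa using this
      have hminP : ∀ i, k ≤ i → i < m → (decide (l[i]? = some c)) = false := by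
        intro i hki him
        have hnp := hmin i hki him
        have hilt : i < l.length := by omega
        by_contra hcontra
        have hc : l[i]? = some c := by
          by_cases h : l[i]? = some c
          · exact h
          · simp [h] at hcontra
        apply hnp
        have : l.drop i = c :: l.drop (i + 1) := by
          rw [List.drop_eq_getElem_cons hilt]
          have : l[i] = c := by
            have := List.getElem?_eq_getElem hilt
            rw [hc] at this; exact (Option.some.inj this).symm
          rw [this]
        exact ⟨l.drop (i + 1), by simp [this]⟩
      rw [pv_filter_range_step l.length m k (fun i => decide (l[i]? = some c)) hkm hmlt
            (by simp [hPm]) hminP]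
      rw [List.map_cons, hrm, ih (m + 1) (by omega) (by omega)]

-- ===== VERDICT (by name: the statement is the Claim_ definition above) =====
theorem parSpacesIdx_spec : Claim_equal_parSpacesIdx := by
  intro u _
  unfold Spec_parSpacesIdx
  simp only [parSpacesIdx, parSpacesIdx_alt]
  generalize PySem.Str.strip u = t
  have hlen : PySem.Str.len t = PySem.List.len t.toList := by
    simp [PySem.Str.len, PySem.List.len]
  rw [hlen, show PySem.List.pyRange 0 (PySem.List.len t.toList) 1
      = (PySem.List.enumerate t.toList 0).map (·.1) from by
        rw [PySem.List.enumerate_eq_map_pyRange t.toList ' ', List.map_map]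
        simp [Function.comp_def],
    List.foldl_map]
  have hfold : List.foldl
      (fun (x : List Int × List Int × List Int) (y : Int × Char) =>
        if PySem.List.pyGetD t.toList y.1 ' ' = '(' then (x.1 ++ [y.1], x.2.1, x.2.2)
        else if PySem.List.pyGetD t.toList y.1 ' ' = ')' then (x.1, x.2.1 ++ [y.1], x.2.2)
        else if PySem.List.pyGetD t.toList y.1 ' ' = ' ' then (x.1, x.2.1, x.2.2 ++ [y.1])
        else x) ([], [], []) (PySem.List.enumerate t.toList 0)
      = List.foldl
      (fun (acc : List Int × List Int × List Int) (p : Int × Char) =>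
        if p.2 = '(' then (acc.1 ++ [p.1], acc.2.1, acc.2.2)
        else if p.2 = ')' then (acc.1, acc.2.1 ++ [p.1], acc.2.2)
        else if p.2 = ' ' then (acc.1, acc.2.1, acc.2.2 ++ [p.1])
        else acc) ([], [], []) (PySem.List.enumerate t.toList 0) := by
    apply PySem.List.foldl_congr_mem
    intro acc p hp
    rcases (PySem.List.mem_enumerate_iff _ _ _).1 hp with ⟨k, hk, rfl⟩
    have hg : PySem.List.pyGetD t.toList ((0 : Int) + k) ' ' = t.toList[k] := by
      rw [show ((0 : Int) + k) = (k : Int) by ring, PySem.List.pyGetD_natCast]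
      simp [List.getD, List.getElem?_eq_getElem hk]
    simp only [hg]
  rw [hfold, pv_fold_enum]
  have key : ∀ c : Char,
      ((PySem.List.enumerate t.toList 0).filter (fun p => p.2 == c)).map (·.1)
        = pvScan t.toList [c] 0 (t.toList.length + 1) := by
    intro c
    rw [pv_enum_filter_range, pv_scan_spec t.toList c 0 (t.toList.length + 1)
          (Nat.zero_le _) (by omega)]
    simp
  simp only [List.nil_append]
  rw [key '(', key ')', key ' ']
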